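-- pv_equiv track=rewrite | github.com/Midhilesh4890/Leetcode-Problems | Google/airports.py | can_reach_destination
-- ===== SOURCE A (Python) =====
-- from collections import defaultdict
-- import heapq
-- from collections import defaultdict
-- import heapq
--
-- def can_reach_destination(airport, destination, flights):
--     # Create a graph representation where each airport maps to a list of outgoing flights
--     graph = defaultdict(list)
--     for dep, arr, dep_time, arr_time in flights:
--         graph[dep].append((arr, dep_time, arr_time))
--
--     # Min heap (priority queue) to track the earliest time we can reach an airport
--     # Each element in heap is (arrival_time, airport)
--     min_heap = [(0, airport)]  # We start at the airport with time 0
--     arrival_times = {airport: 0}  # Dictionary to keep track of the earliest arrival times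
--
--     while min_heap:
--         curr_time, airport = heapq.heappop(min_heap)  # Get the airport with the earliest arrival time
--
--         # If we have reached the destination, return True
--         if airport == destination:
--             return True
--
--         # Process all flights departing from the current airport
--         for next_airport, dep_time, arr_time in graph[airport]:
--             # The package can only board the flight if it has already arrived at the airport before departure
--             if curr_time <= dep_time:  # Ensure the transfer condition is met
--                 # If the next airport has not been visited OR we found a quicker way to reach it
--                 if next_airport not in arrival_times or arr_time < arrival_times[next_airport]:
--                     arrival_times[next_airport] = arr_time  # Update the earliest arrival time
--                     heapq.heappush(min_heap, (arr_time, next_airport))  # Push to the heap for further exploration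
--
--     # If we exit the loop without reaching the destination, return False
--     return False
-- ===== SOURCE B (Python) =====
-- def can_reach_destination(airport, destination, flights):
--     # Bellman-Ford-style relaxation to a fixpoint instead of a priority-queue search.
--     arrival = {airport: 0}
--     while True:
--         changed = False
--         for dep, arr, dep_time, arr_time in flights:
--             if dep in arrival and arrival[dep] <= dep_time and (arr not in arrival or arr_time < arrival[arr]):
--                 arrival[arr] = arr_time
--                 changed = True
--         if not changed:
--             break
--     return destination in arrival
-- ===== Notes on version B (the rewrite author's own statement) =====
-- stated objective: simpler
-- what changed: Replaces the min-heap ordered Dijkstra-style exploration with plain Bellman-Ford relaxation: repeatedly sweep the flight list updating earliest arrivals until a full pass changes nothing, then test membership of the destination; no heap, no graph adjacency structure.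
import Mathlib
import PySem

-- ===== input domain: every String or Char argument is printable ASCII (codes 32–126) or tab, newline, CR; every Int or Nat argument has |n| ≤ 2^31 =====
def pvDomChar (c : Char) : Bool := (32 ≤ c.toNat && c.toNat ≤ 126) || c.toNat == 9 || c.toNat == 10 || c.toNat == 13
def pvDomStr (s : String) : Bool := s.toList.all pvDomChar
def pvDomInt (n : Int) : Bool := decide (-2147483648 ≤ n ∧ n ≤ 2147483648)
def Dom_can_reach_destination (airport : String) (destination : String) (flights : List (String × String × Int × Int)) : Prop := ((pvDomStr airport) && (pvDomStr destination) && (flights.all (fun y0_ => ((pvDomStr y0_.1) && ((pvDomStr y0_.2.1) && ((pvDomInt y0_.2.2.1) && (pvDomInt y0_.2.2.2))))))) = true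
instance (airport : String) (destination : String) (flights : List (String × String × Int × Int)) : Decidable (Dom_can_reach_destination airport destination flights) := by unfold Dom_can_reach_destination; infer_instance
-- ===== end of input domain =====

-- B replaces A's min-heap ordered (Dijkstra-style) exploration by plain Bellman-Ford
-- relaxation sweeps to a fixpoint; same Boolean result (reachability) on every input.


-- Termination measure machinery (cited by name in the ports' decreasing_by):
-- a potential that strictly drops whenever an earliest-arrival entry is lowered or freshly inserted.

-- rank of the current entry of `m` at key `x`: |V|+1 when absent, else #{w ∈ V | w < v}
def pvCost (V : Finset Int) (m : PySem.Dict String Int) (x : String) : Nat :=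
  match m.get? x with
  | none => V.card + 1
  | some v => (V.filter (fun w => w < v)).card

def pvPot (U : Finset String) (V : Finset Int) (m : PySem.Dict String Int) : Nat :=
  ∑ x ∈ U, pvCost V m x

theorem pvCost_insert_lt (V : Finset Int) (m : PySem.Dict String Int) (a : String) (t : Int)
    (htV : t ∈ V) (himp : m.get? a = none ∨ ∃ v, m.get? a = some v ∧ t < v) :
    pvCost V (m.insert a t) a < pvCost V m a := by
  have hself : (m.insert a t).get? a = some t := PySem.Dict.get?_insert_self m a t
  rcases himp with hnone | ⟨v, hv, hlt⟩
  · simp only [pvCost, hself, hnone]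
    have : (V.filter (fun w => w < t)).card ≤ V.card := Finset.card_filter_le _ _
    omega
  · simp only [pvCost, hself, hv]
    apply Finset.card_lt_card
    constructor
    · intro w hw
      simp only [Finset.mem_filter] at hw ⊢
      exact ⟨hw.1, lt_trans hw.2 hlt⟩
    · intro hsub
      have ht : t ∈ V.filter (fun w => w < v) := by
        simp only [Finset.mem_filter]; exact ⟨htV, hlt⟩
      have := hsub ht
      simp only [Finset.mem_filter] at this
      omega

theorem pvCost_insert_ne (V : Finset Int) (m : PySem.Dict String Int) (a x : String) (t : Int)
    (hne : x ≠ a) : pvCost V (m.insert a t) x = pvCost V m x := by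
  simp only [pvCost, PySem.Dict.get?_insert_of_ne m t hne]

theorem pvPot_insert_lt (U : Finset String) (V : Finset Int) (m : PySem.Dict String Int)
    (a : String) (t : Int) (haU : a ∈ U) (htV : t ∈ V)
    (himp : m.get? a = none ∨ ∃ v, m.get? a = some v ∧ t < v) :
    pvPot U V (m.insert a t) < pvPot U V m := by
  apply Finset.sum_lt_sum
  · intro x hx
    by_cases hxa : x = a
    · subst hxa; exact le_of_lt (pvCost_insert_lt V m x t htV himp)
    · exact le_of_eq (pvCost_insert_ne V m a x t hxa)
  · exact ⟨a, haU, pvCost_insert_lt V m a t htV himp⟩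

-- ===== PORT A =====
-- heapq is modelled as a multiset of (time, airport) pairs: heappush appends, heappop removes
-- the minimum under Python's tuple order (Int first, then string; exact on the ASCII domain).
def pyLexLt (x y : Int × String) : Bool := x.1 < y.1 || (x.1 == y.1 && decide (x.2 < y.2))

def heapMin (e : Int × String) (rest : List (Int × String)) : Int × String :=
  rest.foldl (fun b q => if pyLexLt q b then q else b) e

theorem heapMin_mem (e : Int × String) (rest : List (Int × String)) :
    heapMin e rest ∈ e :: rest := by
  induction rest generalizing e with
  | nil => simp [heapMin]
  | cons q t ih =>
    have h := ih (if pyLexLt q e then q else e)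
    simp only [heapMin, List.foldl_cons]
    simp only [heapMin] at h
    rcases List.mem_cons.mp h with h | h
    · rw [h]; split <;> simp
    · simp [h]

-- the universe of keys / arrival values reachable through graph `g`
def pvTargs (g : PySem.Dict String (List (String × Int × Int))) : Finset String :=
  ((g.items.map (·.2)).flatten.map (·.1)).toFinset
def pvVals (g : PySem.Dict String (List (String × Int × Int))) : Finset Int :=
  ((g.items.map (·.2)).flatten.map (·.2.2)).toFinset

theorem pvGetD_mem_flatten (g : PySem.Dict String (List (String × Int × Int))) (x : String)
    (q : String × Int × Int) (hq : q ∈ g.getD x []) : q ∈ (g.items.map (·.2)).flatten := by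
  rcases hg : g.get? x with _ | l
  · rw [PySem.Dict.getD_eq_get?_getD, hg] at hq; simp at hq
  · rw [PySem.Dict.getD_eq_get?_getD, hg] at hq
    simp only [Option.getD_some] at hq
    have : (x, l) ∈ g.items := PySem.Dict.mem_items_of_get?_eq_some g hg
    exact List.mem_flatten.mpr ⟨l, List.mem_map.mpr ⟨(x, l), this, rfl⟩, hq⟩

-- one relaxation step of A's inner for-loop; state is (arrival_times, min_heap)
def relaxA (t : Int) (s : PySem.Dict String Int × List (Int × String)) (q : String × Int × Int) :
    PySem.Dict String Int × List (Int × String) :=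
  if t ≤ q.2.1 then
    if !s.1.contains q.1 || decide (q.2.2 < s.1.getD q.1 0) then
      (s.1.insert q.1 q.2.2, s.2 ++ [(q.2.2, q.1)])
    else s
  else s

theorem relaxA_measure (g : PySem.Dict String (List (String × Int × Int))) (t : Int)
    (gl : List (String × Int × Int)) (hgl : ∀ q ∈ gl, q ∈ (g.items.map (·.2)).flatten) :
    ∀ (m : PySem.Dict String Int) (h : List (Int × String)),
    pvPot (pvTargs g) (pvVals g) (gl.foldl (relaxA t) (m, h)).1 + (gl.foldl (relaxA t) (m, h)).2.length
      ≤ pvPot (pvTargs g) (pvVals g) m + h.length := by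
  induction gl with
  | nil => intro m h; simp
  | cons q tl ih =>
    intro m h
    have hq : q ∈ (g.items.map (·.2)).flatten := hgl q (by simp)
    have hgl' : ∀ q' ∈ tl, q' ∈ (g.items.map (·.2)).flatten := fun q' hq' => hgl q' (by simp [hq'])
    simp only [List.foldl_cons]
    have key : pvPot (pvTargs g) (pvVals g) (relaxA t (m, h) q).1 + (relaxA t (m, h) q).2.length
        ≤ pvPot (pvTargs g) (pvVals g) m + h.length := by
      unfold relaxA
      split
      · split
        · rename_i hc
          simp only [List.length_append, List.length_cons, List.length_nil]
          have haU : q.1 ∈ pvTargs g := by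
            unfold pvTargs
            exact List.mem_toFinset.mpr (List.mem_map.mpr ⟨q, hq, rfl⟩)
          have htV : q.2.2 ∈ pvVals g := by
            unfold pvVals
            exact List.mem_toFinset.mpr (List.mem_map.mpr ⟨q, hq, rfl⟩)
          have himp : m.get? q.1 = none ∨ ∃ v, m.get? q.1 = some v ∧ q.2.2 < v := by
            rcases hmg : m.get? q.1 with _ | v
            · exact Or.inl rfl
            · right; refine ⟨v, rfl, ?_⟩
              have hcont : m.contains q.1 = true := by
                rw [PySem.Dict.contains_eq_isSome_get?, hmg]; rfl
              simp only [hcont, Bool.not_true, Bool.false_or, decide_eq_true_eq] at hc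
              rwa [PySem.Dict.getD_eq_get?_getD, hmg, Option.getD_some] at hc
          have := pvPot_insert_lt (pvTargs g) (pvVals g) m q.1 q.2.2 haU htV himp
          omega
        · exact le_rfl
      · exact le_rfl
    have h2 := ih hgl' (relaxA t (m, h) q).1 (relaxA t (m, h) q).2
    rw [Prod.mk.eta] at h2
    exact le_trans h2 key

-- A's main while-loop over the heap
def loopA (destination : String) (g : PySem.Dict String (List (String × Int × Int))) :
    List (Int × String) → PySem.Dict String Int → Bool
  | [], _ => false
  | e :: rest, m =>
    let p := heapMin e rest
    let h1 := (e :: rest).erase p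
    if p.2 = destination then true
    else
      let s := (g.getD p.2 []).foldl (relaxA p.1) (m, h1)
      loopA destination g s.2 s.1
termination_by h m => pvPot (pvTargs g) (pvVals g) m + h.length
decreasing_by
  have hmem := heapMin_mem e rest
  have hlen : ((e :: rest).erase (heapMin e rest)).length = (e :: rest).length - 1 :=
    List.length_erase_of_mem hmem
  have hms := relaxA_measure g (heapMin e rest).1 (g.getD (heapMin e rest).2 [])
    (fun q hq => pvGetD_mem_flatten g _ q hq) m ((e :: rest).erase (heapMin e rest))
  simp only [List.length_cons] at hlen ⊢
  omega

def can_reach_destination (airport : String) (destination : String) (flights : List (String × String × Int × Int)) : Bool :=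
  -- graph = defaultdict(list); for dep, arr, dep_time, arr_time in flights: graph[dep].append(...)
  let graph := flights.foldl (fun g f => g.modify f.1 [] (· ++ [f.2])) PySem.Dict.empty
  -- min_heap = [(0, airport)]; arrival_times = {airport: 0}
  loopA destination graph [(0, airport)] (PySem.Dict.empty.insert airport 0)

-- ===== PORT B =====
def pvTargsF (flights : List (String × String × Int × Int)) : Finset String :=
  (flights.map (·.2.1)).toFinset
def pvValsF (flights : List (String × String × Int × Int)) : Finset Int :=
  (flights.map (·.2.2.2)).toFinset

-- one full sweep of B's inner for-loop; Bool = `changed`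
def sweepB (flights : List (String × String × Int × Int)) (m : PySem.Dict String Int) :
    PySem.Dict String Int × Bool :=
  flights.foldl (fun s f =>
    if s.1.contains f.1 && decide (s.1.getD f.1 0 ≤ f.2.2.1) &&
       (!s.1.contains f.2.1 || decide (f.2.2.2 < s.1.getD f.2.1 0)) then
      (s.1.insert f.2.1 f.2.2.2, true)
    else s) (m, false)

theorem sweepB_measure (flights : List (String × String × Int × Int)) :
    ∀ (fl : List (String × String × Int × Int)) (_ : ∀ f ∈ fl, f ∈ flights)
      (m : PySem.Dict String Int) (b : Bool),
    let s := fl.foldl (fun s f =>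
      if s.1.contains f.1 && decide (s.1.getD f.1 0 ≤ f.2.2.1) &&
         (!s.1.contains f.2.1 || decide (f.2.2.2 < s.1.getD f.2.1 0)) then
        (s.1.insert f.2.1 f.2.2.2, true)
      else s) (m, b)
    pvPot (pvTargsF flights) (pvValsF flights) s.1 ≤ pvPot (pvTargsF flights) (pvValsF flights) m
      ∧ (s.2 = true → b = true ∨ pvPot (pvTargsF flights) (pvValsF flights) s.1 < pvPot (pvTargsF flights) (pvValsF flights) m) := by
  intro fl
  induction fl with
  | nil => intro _ m b; exact ⟨le_refl _, fun h => Or.inl h⟩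
  | cons f tl ih =>
    intro hsub m b
    have hf : f ∈ flights := hsub f (by simp)
    have hsub' : ∀ f' ∈ tl, f' ∈ flights := fun f' h => hsub f' (by simp [h])
    simp only [List.foldl_cons]
    split
    · rename_i hc
      simp only [Bool.and_eq_true, Bool.or_eq_true, Bool.not_eq_true', decide_eq_true_eq] at hc
      have haU : f.2.1 ∈ pvTargsF flights := by
        unfold pvTargsF; exact List.mem_toFinset.mpr (List.mem_map.mpr ⟨f, hf, rfl⟩)
      have htV : f.2.2.2 ∈ pvValsF flights := by
        unfold pvValsF; exact List.mem_toFinset.mpr (List.mem_map.mpr ⟨f, hf, rfl⟩)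
      have himp : m.get? f.2.1 = none ∨ ∃ v, m.get? f.2.1 = some v ∧ f.2.2.2 < v := by
        rcases hc.2 with hnc | hlt
        · left; rw [PySem.Dict.contains_eq_isSome_get?] at hnc
          rcases hmg : m.get? f.2.1 with _ | v
          · rfl
          · rw [hmg] at hnc; simp at hnc
        · rcases hmg : m.get? f.2.1 with _ | v
          · exact Or.inl rfl
          · right; refine ⟨v, rfl, ?_⟩
            rwa [PySem.Dict.getD_eq_get?_getD, hmg, Option.getD_some] at hlt
      have hdec := pvPot_insert_lt (pvTargsF flights) (pvValsF flights) m f.2.1 f.2.2.2 haU htV himp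
      have := ih hsub' (m.insert f.2.1 f.2.2.2) true
      exact ⟨le_trans this.1 (le_of_lt hdec), fun _ => Or.inr (lt_of_le_of_lt this.1 hdec)⟩
    · exact ih hsub' m b

theorem sweepB_changed (flights : List (String × String × Int × Int)) (m : PySem.Dict String Int)
    (h : (sweepB flights m).2 = true) :
    pvPot (pvTargsF flights) (pvValsF flights) (sweepB flights m).1
      < pvPot (pvTargsF flights) (pvValsF flights) m := by
  have := sweepB_measure flights flights (fun _ h => h) m false
  rcases this.2 h with h' | h'
  · exact absurd h' (by simp)
  · exact h'

-- B's `while True: … if not changed: break` loop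
def loopB (flights : List (String × String × Int × Int)) (m : PySem.Dict String Int) :
    PySem.Dict String Int :=
  let s := sweepB flights m
  if hs : s.2 = true then loopB flights s.1 else s.1
termination_by pvPot (pvTargsF flights) (pvValsF flights) m
decreasing_by
  exact sweepB_changed flights m hs

def can_reach_destination_alt (airport : String) (destination : String) (flights : List (String × String × Int × Int)) : Bool :=
  (loopB flights (PySem.Dict.empty.insert airport 0)).contains destination

-- ===== PRECONDITION & SPEC =====
def Spec_can_reach_destination (airport : String) (destination : String) (flights : List (String × String × Int × Int)) (out : Bool) : Prop := out = can_reach_destination_alt airport destination flights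
instance (airport : String) (destination : String) (flights : List (String × String × Int × Int)) (out : Bool) : Decidable (Spec_can_reach_destination airport destination flights out) := by unfold Spec_can_reach_destination; infer_instance

-- ===== CLAIM (what is proved, stated in full; the proofs are below) =====
def Claim_equal_can_reach_destination : Prop := ∀ (airport : String) (destination : String) (flights : List (String × String × Int × Int)), Dom_can_reach_destination airport destination flights → Spec_can_reach_destination airport destination flights (can_reach_destination airport destination flights)

-- ===== LEMMAS AND PROOFS =====

-- `Rch airport flights x t`: the package can be at airport `x` at time `t` by a
-- time-respecting chain of flights starting at `airport` at time 0.
inductive Rch (airport : String) (flights : List (String × String × Int × Int)) : String → Int → Prop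
  | start : Rch airport flights airport 0
  | step {d a : String} {dt at_ t : Int} : Rch airport flights d t →
      (d, a, dt, at_) ∈ flights → t ≤ dt → Rch airport flights a at_


-- abbreviation for B's loop body (definitionally the lambda inside sweepB)
def stepB (s : PySem.Dict String Int × Bool) (f : String × String × Int × Int) :
    PySem.Dict String Int × Bool :=
  if s.1.contains f.1 && decide (s.1.getD f.1 0 ≤ f.2.2.1) &&
     (!s.1.contains f.2.1 || decide (f.2.2.2 < s.1.getD f.2.1 0)) then
    (s.1.insert f.2.1 f.2.2.2, true)
  else s

theorem sweepB_eq (flights : List (String × String × Int × Int)) (m : PySem.Dict String Int) :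
    sweepB flights m = flights.foldl stepB (m, false) := rfl

theorem stepB_flag (s : PySem.Dict String Int × Bool) (f : String × String × Int × Int)
    (h : s.2 = true) : (stepB s f).2 = true := by
  unfold stepB; split <;> simp [h]

theorem foldB_flag (fl : List (String × String × Int × Int)) :
    ∀ s : PySem.Dict String Int × Bool, s.2 = true → (fl.foldl stepB s).2 = true := by
  induction fl with
  | nil => intro s h; simpa using h
  | cons f tl ih => intro s h; simpa using ih (stepB s f) (stepB_flag s f h)

theorem foldB_mono (fl : List (String × String × Int × Int)) :
    ∀ (s : PySem.Dict String Int × Bool) (x : String) (v : Int), s.1.get? x = some v →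
      ∃ w, w ≤ v ∧ (fl.foldl stepB s).1.get? x = some w := by
  induction fl with
  | nil => intro s x v h; exact ⟨v, le_rfl, h⟩
  | cons f tl ih =>
    intro s x v h
    simp only [List.foldl_cons]
    rcases hsb : stepB s f with ⟨m', b'⟩
    unfold stepB at hsb
    split at hsb
    · rename_i hc
      simp only [Bool.and_eq_true, Bool.or_eq_true, Bool.not_eq_true', decide_eq_true_eq] at hc
      rcases Prod.mk.injEq .. ▸ hsb with ⟨hm', _⟩
      by_cases hx : x = f.2.1
      · have hlt : f.2.2.2 ≤ v := by
          rcases hc.2 with hnc | hlt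
          · rw [PySem.Dict.contains_eq_isSome_get?, ← hx, h] at hnc; simp at hnc
          · rw [PySem.Dict.getD_eq_get?_getD, ← hx, h, Option.getD_some] at hlt; exact le_of_lt hlt
        have : m'.get? x = some f.2.2.2 := by
          rw [← hm', hx]; exact PySem.Dict.get?_insert_self s.1 f.2.1 f.2.2.2
        rcases ih (m', b') x f.2.2.2 this with ⟨w, hw1, hw2⟩
        exact ⟨w, le_trans hw1 hlt, hw2⟩
      · have : m'.get? x = some v := by
          rw [← hm']; rw [PySem.Dict.get?_insert_of_ne s.1 f.2.2.2 hx]; exact h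
        exact ih (m', b') x v this
    · rcases Prod.mk.injEq .. ▸ hsb with ⟨hm', _⟩
      exact ih (m', b') x v (hm' ▸ h)

theorem foldB_sound (airport : String) (flights : List (String × String × Int × Int))
    (fl : List (String × String × Int × Int)) (hsub : ∀ f ∈ fl, f ∈ flights) :
    ∀ (s : PySem.Dict String Int × Bool),
      (∀ x v, s.1.get? x = some v → Rch airport flights x v) →
      ∀ x v, (fl.foldl stepB s).1.get? x = some v → Rch airport flights x v := by
  induction fl with
  | nil => intro s hs x v h; exact hs x v h
  | cons f tl ih =>
    intro s hs x v h
    simp only [List.foldl_cons] at h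
    refine ih (fun f' hf' => hsub f' (by simp [hf'])) (stepB s f) ?_ x v h
    intro y u hy
    rcases hst : stepB s f with ⟨m', b'⟩
    rw [hst] at hy
    unfold stepB at hst
    split at hst
    · rename_i hc
      simp only [Bool.and_eq_true, Bool.or_eq_true, Bool.not_eq_true', decide_eq_true_eq] at hc
      rcases Prod.mk.injEq .. ▸ hst with ⟨hm', _⟩
      by_cases hy2 : y = f.2.1
      · subst hy2
        rw [← hm', PySem.Dict.get?_insert_self] at hy
        rcases Option.some.inj hy with rfl
        have hcont := hc.1.1
        rw [PySem.Dict.contains_eq_isSome_get?] at hcont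
        rcases hdg : s.1.get? f.1 with _ | dv
        · rw [hdg] at hcont; simp at hcont
        · have hrd : Rch airport flights f.1 dv := hs f.1 dv hdg
          have hle : dv ≤ f.2.2.1 := by
            have := hc.1.2
            rwa [PySem.Dict.getD_eq_get?_getD, hdg, Option.getD_some] at this
          have hmem : (f.1, f.2.1, f.2.2.1, f.2.2.2) ∈ flights := hsub f (by simp)
          exact Rch.step hrd hmem hle
      · rw [← hm', PySem.Dict.get?_insert_of_ne s.1 f.2.2.2 hy2] at hy
        exact hs y u hy
    · rcases Prod.mk.injEq .. ▸ hst with ⟨hm', _⟩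
      exact hs y u (hm' ▸ hy)

theorem foldB_nochange (flights : List (String × String × Int × Int)) :
    ∀ (fl : List (String × String × Int × Int)) (m : PySem.Dict String Int), (fl.foldl stepB (m, false)).2 = false →
      (fl.foldl stepB (m, false)).1 = m ∧
      ∀ f ∈ fl, ∀ v, m.get? f.1 = some v → v ≤ f.2.2.1 →
        ∃ w, w ≤ f.2.2.2 ∧ m.get? f.2.1 = some w := by
  intro fl
  induction fl with
  | nil => intro m h; exact ⟨rfl, by simp⟩
  | cons f tl ih =>
    intro m h
    simp only [List.foldl_cons] at h ⊢
    rcases hst : stepB (m, false) f with ⟨m', b'⟩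
    rw [hst] at h
    unfold stepB at hst
    split at hst
    · rcases Prod.mk.injEq .. ▸ hst with ⟨_, hb'⟩
      rw [← hb'] at h
      rw [foldB_flag tl (m', true) rfl] at h
      exact absurd h (by simp)
    · rename_i hc
      rcases Prod.mk.injEq .. ▸ hst with ⟨hm', hb'⟩
      rw [← hm', ← hb'] at h
      rcases ih m h with ⟨h1, h2⟩
      rw [← hm', ← hb']
      refine ⟨h1, ?_⟩
      intro f' hf' v hv hvle
      rcases List.mem_cons.mp hf' with rfl | hf'
      · -- the head flight: its enabling condition must have failed on m
        simp only [Bool.and_eq_true, Bool.or_eq_true, Bool.not_eq_true',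
          decide_eq_true_eq, not_and, not_or] at hc
        have hcont : m.contains f'.1 = true := by
          rw [PySem.Dict.contains_eq_isSome_get?, hv]; rfl
        have hgd : m.getD f'.1 0 = v := by
          rw [PySem.Dict.getD_eq_get?_getD, hv]; rfl
        have h3 := hc ⟨hcont, by rw [hgd]; exact hvle⟩
        rcases h3 with ⟨hca, hnlt⟩
        rw [PySem.Dict.contains_eq_isSome_get?] at hca
        rcases hag : m.get? f'.2.1 with _ | w
        · rw [hag] at hca; simp at hca
        · refine ⟨w, ?_, rfl⟩
          have := hnlt
          rw [PySem.Dict.getD_eq_get?_getD, hag, Option.getD_some] at this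
          omega
      · exact h2 f' hf' v hv hvle

theorem loopB_mono (flights : List (String × String × Int × Int))
    (m : PySem.Dict String Int) :
    ∀ (x : String) (v : Int), m.get? x = some v →
      ∃ w, w ≤ v ∧ (loopB flights m).get? x = some w := by
  fun_induction loopB flights m with
  | case1 m s hs ih =>
    intro x v h
    rcases foldB_mono flights (m, false) x v h with ⟨w, hw1, hw2⟩
    rcases ih x w hw2 with ⟨w', hw1', hw2'⟩
    exact ⟨w', le_trans hw1' hw1, hw2'⟩
  | case2 m s hs =>
    intro x v h
    have hb : (sweepB flights m).2 = false := by simpa using hs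
    have hfix := (foldB_nochange flights flights m (by rw [← sweepB_eq]; exact hb)).1
    rw [← sweepB_eq] at hfix
    refine ⟨v, le_rfl, ?_⟩
    show (sweepB flights m).1.get? x = some v
    rw [hfix]; exact h

theorem loopB_sound (airport : String) (flights : List (String × String × Int × Int))
    (m : PySem.Dict String Int) (hm : ∀ x v, m.get? x = some v → Rch airport flights x v) :
    ∀ x v, (loopB flights m).get? x = some v → Rch airport flights x v := by
  fun_induction loopB flights m with
  | case1 m s hs ih =>
    refine ih ?_
    intro x v hx
    have hx' : (flights.foldl stepB (m, false)).1.get? x = some v := hx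
    exact foldB_sound airport flights flights (fun _ h => h) (m, false) hm x v hx'
  | case2 m s hs =>
    intro x v hx
    have hb : (sweepB flights m).2 = false := by simpa using hs
    have hfix := (foldB_nochange flights flights m (by rw [← sweepB_eq]; exact hb)).1
    rw [← sweepB_eq] at hfix
    have hx' : (sweepB flights m).1.get? x = some v := hx
    rw [hfix] at hx'
    exact hm x v hx'

theorem loopB_fix (flights : List (String × String × Int × Int))
    (m : PySem.Dict String Int) :
    (sweepB flights (loopB flights m)).2 = false := by
  fun_induction loopB flights m with
  | case1 m s hs ih => exact ih
  | case2 m s hs =>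
    have hb : (sweepB flights m).2 = false := by simpa using hs
    have hfix := (foldB_nochange flights flights m (by rw [← sweepB_eq]; exact hb)).1
    rw [← sweepB_eq] at hfix
    show (sweepB flights (sweepB flights m).1).2 = false
    rw [hfix]
    exact hb

theorem fix_complete (airport : String) (flights : List (String × String × Int × Int))
    (m : PySem.Dict String Int)
    (hbase : ∃ v, v ≤ 0 ∧ m.get? airport = some v)
    (hfix : ∀ f ∈ flights, ∀ v, m.get? f.1 = some v → v ≤ f.2.2.1 →
      ∃ w, w ≤ f.2.2.2 ∧ m.get? f.2.1 = some w) :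
    ∀ y s, Rch airport flights y s → ∃ w, w ≤ s ∧ m.get? y = some w := by
  intro y s hr
  induction hr with
  | start => exact hbase
  | step hd hf hle ih =>
    rcases ih with ⟨w, hw1, hw2⟩
    rcases hfix _ hf w hw2 (le_trans hw1 hle) with ⟨u, hu1, hu2⟩
    exact ⟨u, hu1, hu2⟩

theorem altB_iff (airport destination : String) (flights : List (String × String × Int × Int)) :
    can_reach_destination_alt airport destination flights = true ↔
      ∃ t, Rch airport flights destination t := by
  unfold can_reach_destination_alt
  rw [PySem.Dict.contains_eq_isSome_get?]
  constructor
  · intro h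
    rcases hg : (loopB flights (PySem.Dict.empty.insert airport 0)).get? destination with _ | v
    · rw [hg] at h; simp at h
    · refine ⟨v, ?_⟩
      refine loopB_sound airport flights _ ?_ destination v hg
      intro x u hx
      by_cases hxa : x = airport
      · subst hxa
        rw [PySem.Dict.get?_insert_self] at hx
        rcases Option.some.inj hx with rfl
        exact Rch.start
      · rw [PySem.Dict.get?_insert_of_ne PySem.Dict.empty 0 hxa, PySem.Dict.get?_empty] at hx
        simp at hx
  · rintro ⟨t, hr⟩
    have hfixflag := loopB_fix flights (PySem.Dict.empty.insert airport 0)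
    rw [sweepB_eq] at hfixflag
    have hnc := foldB_nochange flights flights _ hfixflag
    have hbase : ∃ v, v ≤ 0 ∧
        (loopB flights (PySem.Dict.empty.insert airport 0)).get? airport = some v := by
      rcases loopB_mono flights (PySem.Dict.empty.insert airport 0) airport 0
        (PySem.Dict.get?_insert_self _ _ _) with ⟨w, hw1, hw2⟩
      exact ⟨w, hw1, hw2⟩
    rcases fix_complete airport flights _ hbase hnc.2 destination t hr with ⟨w, _, hw⟩
    rw [hw]; rfl


-- ---- A-side: the heap loop reaches exactly the same closure ----

theorem graph_getD (flights : List (String × String × Int × Int)) (x : String) :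
    (flights.foldl (fun g f => g.modify f.1 [] (· ++ [f.2])) PySem.Dict.empty).getD x [] =
      (flights.filter (fun p => p.1 == x)).map (·.2) := by
  have := PySem.Dict.getD_foldl_modify_append flights PySem.Dict.empty x
  simpa using this

theorem graph_mem (flights : List (String × String × Int × Int)) (x a : String) (dt at_ : Int) :
    (a, dt, at_) ∈ (flights.foldl (fun g f => g.modify f.1 [] (· ++ [f.2])) PySem.Dict.empty).getD x []
      ↔ (x, a, dt, at_) ∈ flights := by
  rw [graph_getD]
  constructor
  · intro h
    rcases List.mem_map.mp h with ⟨p, hp, hpe⟩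
    rcases List.mem_filter.mp hp with ⟨hpf, hpx⟩
    obtain ⟨p1, p2⟩ := p
    simp only [beq_iff_eq] at hpx
    simp only at hpe
    rw [← hpx, ← hpe]
    exact hpf
  · intro h
    exact List.mem_map.mpr ⟨(x, a, dt, at_), List.mem_filter.mpr ⟨h, by simp⟩, rfl⟩

def DoneA (flights : List (String × String × Int × Int)) (m : PySem.Dict String Int)
    (x : String) (v : Int) : Prop :=
  ∀ f ∈ flights, f.1 = x → v ≤ f.2.2.1 → ∃ w, w ≤ f.2.2.2 ∧ m.get? f.2.1 = some w

-- the loop invariant of A's heap loop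
def InvA (airport destination : String) (flights : List (String × String × Int × Int))
    (h : List (Int × String)) (m : PySem.Dict String Int) : Prop :=
  (∀ p ∈ h, Rch airport flights p.2 p.1) ∧
  (∀ x v, m.get? x = some v → Rch airport flights x v) ∧
  (∃ v, v ≤ 0 ∧ m.get? airport = some v) ∧
  (∀ v, m.get? destination = some v → ∃ t, (t, destination) ∈ h) ∧
  (∀ x v, m.get? x = some v → (v, x) ∈ h ∨ DoneA flights m x v)

theorem relax_mono (t : Int) (gl : List (String × Int × Int)) :
    ∀ (m : PySem.Dict String Int) (h : List (Int × String)) (x : String) (v : Int),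
      m.get? x = some v →
      ∃ w, w ≤ v ∧ (gl.foldl (relaxA t) (m, h)).1.get? x = some w := by
  induction gl with
  | nil => intro m h x v hv; exact ⟨v, le_rfl, hv⟩
  | cons q tl ih =>
    intro m h x v hv
    simp only [List.foldl_cons]
    rcases hst : relaxA t (m, h) q with ⟨m1, h1⟩
    unfold relaxA at hst
    split at hst
    · split at hst
      · rename_i hc
        rcases Prod.mk.injEq .. ▸ hst with ⟨hm1, hh1⟩
        by_cases hx : x = q.1
        · have hle : q.2.2 ≤ v := by
            simp only [Bool.or_eq_true, Bool.not_eq_true', decide_eq_true_eq] at hc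
            rcases hc with hnc | hlt
            · rw [PySem.Dict.contains_eq_isSome_get?, ← hx, hv] at hnc; simp at hnc
            · rw [PySem.Dict.getD_eq_get?_getD, ← hx, hv, Option.getD_some] at hlt
              exact le_of_lt hlt
          have hm : m1.get? x = some q.2.2 := by
            rw [← hm1, hx]; exact PySem.Dict.get?_insert_self _ _ _
          rcases ih m1 h1 x q.2.2 hm with ⟨w, hw1, hw2⟩
          exact ⟨w, le_trans hw1 hle, hw2⟩
        · have hm : m1.get? x = some v := by
            rw [← hm1]; rw [PySem.Dict.get?_insert_of_ne _ _ hx]; exact hv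
          exact ih m1 h1 x v hm
      · rcases Prod.mk.injEq .. ▸ hst with ⟨hm1, _⟩
        exact ih m1 h1 x v (hm1 ▸ hv)
    · rcases Prod.mk.injEq .. ▸ hst with ⟨hm1, _⟩
      exact ih m1 h1 x v (hm1 ▸ hv)

theorem relax_hsub (t : Int) (gl : List (String × Int × Int)) :
    ∀ (m : PySem.Dict String Int) (h : List (Int × String)) (r : Int × String),
      r ∈ h → r ∈ (gl.foldl (relaxA t) (m, h)).2 := by
  induction gl with
  | nil => intro m h r hr; exact hr
  | cons q tl ih =>
    intro m h r hr
    simp only [List.foldl_cons]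
    rcases hst : relaxA t (m, h) q with ⟨m1, h1⟩
    have hr1 : r ∈ h1 := by
      unfold relaxA at hst
      split at hst
      · split at hst
        · rcases Prod.mk.injEq .. ▸ hst with ⟨_, hh1⟩
          rw [← hh1]; exact List.mem_append_left _ hr
        · rcases Prod.mk.injEq .. ▸ hst with ⟨_, hh1⟩
          exact hh1 ▸ hr
      · rcases Prod.mk.injEq .. ▸ hst with ⟨_, hh1⟩
        exact hh1 ▸ hr
    exact ih m1 h1 r hr1

theorem relax_sound (airport : String) (flights : List (String × String × Int × Int))
    (xp : String) (t : Int) (hT : Rch airport flights xp t)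
    (gl : List (String × Int × Int)) (hgl : ∀ q ∈ gl, (xp, q) ∈ flights) :
    ∀ (m : PySem.Dict String Int) (h : List (Int × String)),
      (∀ p ∈ h, Rch airport flights p.2 p.1) →
      (∀ x v, m.get? x = some v → Rch airport flights x v) →
      (∀ p ∈ (gl.foldl (relaxA t) (m, h)).2, Rch airport flights p.2 p.1) ∧
      (∀ x v, (gl.foldl (relaxA t) (m, h)).1.get? x = some v → Rch airport flights x v) := by
  induction gl with
  | nil => intro m h hh hm; exact ⟨hh, hm⟩
  | cons q tl ih =>
    intro m h hh hm
    simp only [List.foldl_cons]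
    rcases hst : relaxA t (m, h) q with ⟨m1, h1⟩
    have hq : (xp, q) ∈ flights := hgl q (by simp)
    have hnew : ∀ hcond : t ≤ q.2.1, Rch airport flights q.1 q.2.2 :=
      fun hcond => Rch.step hT hq hcond
    have hpair : (∀ p ∈ h1, Rch airport flights p.2 p.1) ∧
        (∀ x v, m1.get? x = some v → Rch airport flights x v) := by
      unfold relaxA at hst
      split at hst
      · rename_i hcond
        split at hst
        · rcases Prod.mk.injEq .. ▸ hst with ⟨hm1, hh1⟩
          constructor
          · intro p hp
            rw [← hh1] at hp
            rcases List.mem_append.mp hp with hp | hp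
            · exact hh p hp
            · rcases List.mem_singleton.mp hp with rfl
              exact hnew hcond
          · intro x v hv
            rw [← hm1] at hv
            by_cases hx : x = q.1
            · rw [hx, PySem.Dict.get?_insert_self] at hv
              rcases Option.some.inj hv with rfl
              rw [hx]
              exact hnew hcond
            · rw [PySem.Dict.get?_insert_of_ne _ _ hx] at hv
              exact hm x v hv
        · rcases Prod.mk.injEq .. ▸ hst with ⟨hm1, hh1⟩
          exact ⟨fun p hp => hh p (hh1 ▸ hp), fun x v hv => hm x v (hm1 ▸ hv)⟩
      · rcases Prod.mk.injEq .. ▸ hst with ⟨hm1, hh1⟩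
        exact ⟨fun p hp => hh p (hh1 ▸ hp), fun x v hv => hm x v (hm1 ▸ hv)⟩
    exact ih (fun q' hq' => hgl q' (by simp [hq'])) m1 h1 hpair.1 hpair.2

theorem relax_from (t : Int) (gl : List (String × Int × Int)) :
    ∀ (m : PySem.Dict String Int) (h : List (Int × String)) (x : String) (v : Int),
      (gl.foldl (relaxA t) (m, h)).1.get? x = some v →
      m.get? x = some v ∨ (v, x) ∈ (gl.foldl (relaxA t) (m, h)).2 := by
  induction gl with
  | nil => intro m h x v hv; exact Or.inl hv
  | cons q tl ih =>
    intro m h x v hv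
    simp only [List.foldl_cons] at hv ⊢
    rcases hst : relaxA t (m, h) q with ⟨m1, h1⟩
    rw [hst] at hv
    rcases ih m1 h1 x v hv with hv1 | hv1
    · unfold relaxA at hst
      split at hst
      · split at hst
        · rcases Prod.mk.injEq .. ▸ hst with ⟨hm1, hh1⟩
          by_cases hx : x = q.1
          · rw [← hm1, hx, PySem.Dict.get?_insert_self] at hv1
            rcases Option.some.inj hv1 with rfl
            right
            refine relax_hsub t tl m1 h1 _ ?_
            rw [← hh1, hx]
            exact List.mem_append_right _ (by simp)
          · rw [← hm1, PySem.Dict.get?_insert_of_ne _ _ hx] at hv1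
            exact Or.inl hv1
        · rcases Prod.mk.injEq .. ▸ hst with ⟨hm1, _⟩
          exact Or.inl (hm1 ▸ hv1)
      · rcases Prod.mk.injEq .. ▸ hst with ⟨hm1, _⟩
        exact Or.inl (hm1 ▸ hv1)
    · exact Or.inr hv1

theorem relax_ensure (t : Int) (gl : List (String × Int × Int)) :
    ∀ (m : PySem.Dict String Int) (h : List (Int × String)) (q : String × Int × Int),
      q ∈ gl → t ≤ q.2.1 →
      ∃ w, w ≤ q.2.2 ∧ (gl.foldl (relaxA t) (m, h)).1.get? q.1 = some w := by
  induction gl with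
  | nil => intro m h q hq; simp at hq
  | cons q0 tl ih =>
    intro m h q hq hle
    simp only [List.foldl_cons]
    rcases List.mem_cons.mp hq with rfl | hq
    · rcases hst : relaxA t (m, h) q with ⟨m1, h1⟩
      have : ∃ w, w ≤ q.2.2 ∧ m1.get? q.1 = some w := by
        unfold relaxA at hst
        rw [if_pos hle] at hst
        split at hst
        · rcases Prod.mk.injEq .. ▸ hst with ⟨hm1, _⟩
          exact ⟨q.2.2, le_rfl, by rw [← hm1]; exact PySem.Dict.get?_insert_self _ _ _⟩
        · rename_i hc
          simp only [Bool.or_eq_true, Bool.not_eq_true', decide_eq_true_eq, not_or, not_lt] at hc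
          rcases Prod.mk.injEq .. ▸ hst with ⟨hm1, _⟩
          have hcont := hc.1
          rw [PySem.Dict.contains_eq_isSome_get?] at hcont
          rcases hmg : m.get? q.1 with _ | w
          · rw [hmg] at hcont; simp at hcont
          · have hw : w ≤ q.2.2 := by
              have := hc.2
              rwa [PySem.Dict.getD_eq_get?_getD, hmg, Option.getD_some] at this
            exact ⟨w, hw, by rw [← hm1]; exact hmg⟩
      rcases this with ⟨w, hw1, hw2⟩
      rcases relax_mono t tl m1 h1 q.1 w hw2 with ⟨w', hw1', hw2'⟩
      exact ⟨w', le_trans hw1' hw1, hw2'⟩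
    · rcases hst : relaxA t (m, h) q0 with ⟨m1, h1⟩
      exact ih m1 h1 q hq hle

theorem DoneA_mono (flights : List (String × String × Int × Int))
    (m m' : PySem.Dict String Int)
    (hmm : ∀ y u, m.get? y = some u → ∃ u', u' ≤ u ∧ m'.get? y = some u')
    (x : String) (v : Int) (hd : DoneA flights m x v) : DoneA flights m' x v := by
  intro f hf hfx hfle
  rcases hd f hf hfx hfle with ⟨w, hw1, hw2⟩
  rcases hmm _ _ hw2 with ⟨u, hu1, hu2⟩
  exact ⟨u, le_trans hu1 hw1, hu2⟩


theorem InvA_step (airport destination : String)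
    (flights : List (String × String × Int × Int))
    (g : PySem.Dict String (List (String × Int × Int)))
    (hg : ∀ x a dt at_, ((a, dt, at_) ∈ g.getD x [] ↔ (x, a, dt, at_) ∈ flights))
    (e : Int × String) (rest : List (Int × String)) (m : PySem.Dict String Int)
    (hInv : InvA airport destination flights (e :: rest) m)
    (hne : (heapMin e rest).2 ≠ destination) :
    InvA airport destination flights
      ((g.getD (heapMin e rest).2 []).foldl (relaxA (heapMin e rest).1)
        (m, (e :: rest).erase (heapMin e rest))).2
      ((g.getD (heapMin e rest).2 []).foldl (relaxA (heapMin e rest).1)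
        (m, (e :: rest).erase (heapMin e rest))).1 := by
  obtain ⟨inv1, inv2, inv3, inv4, inv5⟩ := hInv
  set p := heapMin e rest with hpdef
  set gl := g.getD p.2 [] with hgldef
  set h1 := (e :: rest).erase p with h1def
  have hpm : p ∈ e :: rest := heapMin_mem e rest
  have hT : Rch airport flights p.2 p.1 := inv1 p hpm
  have hgl : ∀ q ∈ gl, (p.2, q) ∈ flights := fun q hq => (hg p.2 q.1 q.2.1 q.2.2).mp hq
  have hsnd := relax_sound airport flights p.2 p.1 hT gl hgl m h1
    (fun r hr => inv1 r (List.erase_subset hr)) inv2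
  refine ⟨hsnd.1, hsnd.2, ?_, ?_, ?_⟩
  · rcases inv3 with ⟨v, hv0, hv⟩
    rcases relax_mono p.1 gl m h1 airport v hv with ⟨w, hw1, hw2⟩
    exact ⟨w, le_trans hw1 hv0, hw2⟩
  · intro v hv
    rcases relax_from p.1 gl m h1 destination v hv with hv1 | hv1
    · rcases inv4 v hv1 with ⟨t', ht'⟩
      have hne' : (t', destination) ≠ p := fun heq => hne (by rw [← heq])
      have hmem : (t', destination) ∈ h1 := (List.mem_erase_of_ne hne').mpr ht'
      exact ⟨t', relax_hsub p.1 gl m h1 _ hmem⟩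
    · exact ⟨v, hv1⟩
  · intro x v hv
    rcases relax_from p.1 gl m h1 x v hv with hv1 | hv1
    · rcases inv5 x v hv1 with hcase | hdone
      · by_cases hpx : (v, x) = p
        · right
          rintro ⟨f1, fr⟩ hf hfx hfle
          have hx2 : x = p.2 := congrArg Prod.snd hpx
          have hv1' : v = p.1 := congrArg Prod.fst hpx
          have hfr : fr ∈ gl := by
            refine (hg p.2 fr.1 fr.2.1 fr.2.2).mpr ?_
            rw [← hx2, ← hfx]
            exact hf
          have hens := relax_ensure p.1 gl m h1 fr hfr (by rw [← hv1']; exact hfle)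
          exact hens
        · left
          have hmem : (v, x) ∈ h1 := (List.mem_erase_of_ne hpx).mpr hcase
          exact relax_hsub p.1 gl m h1 _ hmem
      · right
        exact DoneA_mono flights m _ (fun y u hy => relax_mono p.1 gl m h1 y u hy) x v hdone
    · left; exact hv1

theorem loopA_iff (airport destination : String)
    (flights : List (String × String × Int × Int))
    (g : PySem.Dict String (List (String × Int × Int)))
    (hg : ∀ x a dt at_, ((a, dt, at_) ∈ g.getD x [] ↔ (x, a, dt, at_) ∈ flights)) :
    ∀ (h : List (Int × String)) (m : PySem.Dict String Int),
      InvA airport destination flights h m →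
      (loopA destination g h m = true ↔ ∃ t, Rch airport flights destination t) := by
  intro h m
  fun_induction loopA destination g h m with
  | case1 m =>
    intro hInv
    obtain ⟨inv1, inv2, inv3, inv4, inv5⟩ := hInv
    simp only [Bool.false_eq_true, false_iff]
    rintro ⟨t, hr⟩
    have hfix : ∀ f ∈ flights, ∀ v, m.get? f.1 = some v → v ≤ f.2.2.1 →
        ∃ w, w ≤ f.2.2.2 ∧ m.get? f.2.1 = some w := by
      intro f hf v hv hle
      rcases inv5 f.1 v hv with hmem | hdone
      · simp at hmem
      · exact hdone f hf rfl hle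
    rcases fix_complete airport flights m inv3 hfix destination t hr with ⟨w, _, hw⟩
    rcases inv4 w hw with ⟨t', ht'⟩
    simp at ht'
  | case2 e rest m p hpd =>
    intro hInv
    simp only [true_iff]
    have hr : Rch airport flights (heapMin e rest).2 (heapMin e rest).1 :=
      hInv.1 _ (heapMin_mem e rest)
    rw [hpd] at hr
    exact ⟨(heapMin e rest).1, hr⟩
  | case3 e rest m p h1 hpd s ih =>
    intro hInv
    exact ih (InvA_step airport destination flights g hg e rest m hInv hpd)

theorem A_iff (airport destination : String)
    (flights : List (String × String × Int × Int)) :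
    can_reach_destination airport destination flights = true ↔
      ∃ t, Rch airport flights destination t := by
  unfold can_reach_destination
  refine loopA_iff airport destination flights _
    (fun x a dt at_ => graph_mem flights x a dt at_) _ _ ?_
  refine ⟨?_, ?_, ?_, ?_, ?_⟩
  · intro p hp
    rcases List.mem_singleton.mp hp with rfl
    exact Rch.start
  · intro x v hv
    by_cases hx : x = airport
    · rw [hx, PySem.Dict.get?_insert_self] at hv
      rcases Option.some.inj hv with rfl
      rw [hx]
      exact Rch.start
    · rw [PySem.Dict.get?_insert_of_ne _ _ hx, PySem.Dict.get?_empty] at hv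
      simp at hv
  · exact ⟨0, le_rfl, PySem.Dict.get?_insert_self _ _ _⟩
  · intro v hv
    by_cases hx : destination = airport
    · rw [hx, PySem.Dict.get?_insert_self] at hv
      rcases Option.some.inj hv with rfl
      exact ⟨0, by rw [hx]; simp⟩
    · rw [PySem.Dict.get?_insert_of_ne _ _ hx, PySem.Dict.get?_empty] at hv
      simp at hv
  · intro x v hv
    by_cases hx : x = airport
    · left
      rw [hx, PySem.Dict.get?_insert_self] at hv
      rcases Option.some.inj hv with rfl
      rw [hx]
      simp
    · rw [PySem.Dict.get?_insert_of_ne _ _ hx, PySem.Dict.get?_empty] at hv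
      simp at hv

-- ===== VERDICT (by name: the statement is the Claim_ definition above) =====
theorem can_reach_destination_spec : Claim_equal_can_reach_destination := by
  unfold Claim_equal_can_reach_destination
  intro airport destination flights _
  unfold Spec_can_reach_destination
  rw [Bool.eq_iff_iff, A_iff airport destination flights, altB_iff airport destination flights]
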